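-- pv_equiv track=rewrite | github.com/vitalyruhl/ConfigurationsManager | tools/build_feature_matrix.py | find_build_flags_block
-- ===== SOURCE A (Python) =====
-- from typing import Dict, List, Tuple
--
-- def find_build_flags_block(lines: List[str], env_start: int, env_end: int) -> Tuple[int, int]:
--     if env_start < 0:
--         return -1, -1
--     start = end = -1
--     i = env_start
--     while i < env_end:
--         ln = lines[i]
--         if ln.strip().startswith('build_flags') and '=' in ln:
--             start = i
--             i += 1
--             # Collect continuation lines: indented or empty lines until next key (=) at col 0
--             while i < env_end:
--                 raw = lines[i]
--                 s = raw.strip()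
--                 is_key_line = (not raw.startswith((' ', '\t', ';', '#'))) and ('=' in raw)
--                 if s and is_key_line:
--                     break
--                 i += 1
--             end = i
--             break
--         i += 1
--     return start, end
-- ===== SOURCE B (Python) =====
-- from typing import List, Tuple
--
--
-- def find_build_flags_block(lines: List[str], env_start: int, env_end: int) -> Tuple[int, int]:
--     if env_start < 0:
--         return -1, -1
--     idx = range(env_start, env_end)
--     # positions of all non-blank top-level key lines (no indent/;/# prefix, contains '=')
--     keys = [i for i in idx
--             if not lines[i].startswith((' ', '\t', ';', '#'))
--             and '=' in lines[i] and lines[i].strip()]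
--     start = next((i for i in idx
--                   if lines[i].strip().startswith('build_flags') and '=' in lines[i]), -1)
--     if start < 0:
--         return -1, -1
--     end = next((k for k in keys if k > start), env_end)
--     return start, end
-- ===== Notes on version B (the rewrite author's own statement) =====
-- stated objective: alternative
-- what changed: Replaces A's nested while-loops (outer scan with an inner continuation-consuming loop and breaks) by a two-phase index computation: first-match search for the build_flags line plus a precollected list of top-level key positions, with end = first key position strictly after start (or env_end).
-- outside the precondition, e.g. on find_build_flags_block(['build_flags = x', 'a=1'], 0, 5): A returns (0, 1), B raises IndexError
import Mathlib
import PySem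

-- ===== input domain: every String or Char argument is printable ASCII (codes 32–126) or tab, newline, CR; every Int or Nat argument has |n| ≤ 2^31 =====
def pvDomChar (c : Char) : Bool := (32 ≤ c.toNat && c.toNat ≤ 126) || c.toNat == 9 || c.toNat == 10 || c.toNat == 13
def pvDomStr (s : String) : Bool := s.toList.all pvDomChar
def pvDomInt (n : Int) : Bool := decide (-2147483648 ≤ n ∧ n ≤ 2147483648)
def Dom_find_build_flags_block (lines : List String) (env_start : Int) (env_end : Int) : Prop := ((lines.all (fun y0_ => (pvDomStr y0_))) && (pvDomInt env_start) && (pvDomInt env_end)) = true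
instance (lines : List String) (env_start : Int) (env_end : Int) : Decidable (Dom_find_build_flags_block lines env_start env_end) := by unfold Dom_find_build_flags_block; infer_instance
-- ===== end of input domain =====

set_option maxHeartbeats 1000000


-- B replaces A's nested while-loops by a two-phase index computation (first build_flags
-- match + precollected top-level key positions); objective: alternative decomposition.

-- ===== PORT A =====
-- ln.strip().startswith('build_flags') and '=' in ln
def pvA_isBF (ln : String) : Bool :=
  PySem.Str.startswith (PySem.Str.strip ln) "build_flags" && PySem.Str.isIn "=" ln

-- inner while loop of A: returns the i at which it stops (= end)
def pvA_inner (lines : List String) (env_end : Int) (i : Int) : Int :=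
  if h : i < env_end then
    match PySem.List.pyGet? lines i with
    | none => i   -- Python raises IndexError here; excluded by Pre_
    | some raw =>
      let s := PySem.Str.strip raw
      let is_key_line := !(PySem.Str.startswith raw " " || PySem.Str.startswith raw "\t" ||
                           PySem.Str.startswith raw ";" || PySem.Str.startswith raw "#") &&
                         PySem.Str.isIn "=" raw
      if s ≠ "" ∧ is_key_line then i else pvA_inner lines env_end (i + 1)
  else i
termination_by (env_end - i).toNat
decreasing_by omega

-- outer while loop of A
def pvA_outer (lines : List String) (env_end : Int) (i : Int) : Int × Int :=
  if h : i < env_end then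
    match PySem.List.pyGet? lines i with
    | none => (i, i)   -- Python raises IndexError here; excluded by Pre_
    | some ln =>
      if pvA_isBF ln then (i, pvA_inner lines env_end (i + 1))
      else pvA_outer lines env_end (i + 1)
  else (-1, -1)
termination_by (env_end - i).toNat
decreasing_by omega

def find_build_flags_block (lines : List String) (env_start : Int) (env_end : Int) : Int × Int :=
  if env_start < 0 then (-1, -1)
  else pvA_outer lines env_end env_start

-- ===== PORT B =====
-- key-line predicate at index i (lines[i] read with pyGet?; none only outside Pre_)
def pvB_keyAt (lines : List String) (i : Int) : Bool :=
  let raw := (PySem.List.pyGet? lines i).getD ""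
  !(PySem.Str.startswith raw " " || PySem.Str.startswith raw "\t" ||
    PySem.Str.startswith raw ";" || PySem.Str.startswith raw "#") &&
  PySem.Str.isIn "=" raw && PySem.Str.strip raw ≠ ""

def pvB_bfAt (lines : List String) (i : Int) : Bool :=
  let raw := (PySem.List.pyGet? lines i).getD ""
  PySem.Str.startswith (PySem.Str.strip raw) "build_flags" && PySem.Str.isIn "=" raw

def find_build_flags_block_alt (lines : List String) (env_start : Int) (env_end : Int) : Int × Int :=
  if env_start < 0 then (-1, -1)
  else
    let idx := PySem.List.pyRange env_start env_end 1
    let keys := idx.filter (fun i => pvB_keyAt lines i)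
    let start := ((idx.filter (fun i => pvB_bfAt lines i)).head?).getD (-1)
    if start < 0 then (-1, -1)
    else (start, ((keys.filter (fun k => start < k)).head?).getD env_end)

-- ===== PRECONDITION & SPEC =====
-- Pre_ excludes scan ranges reaching past the end of lines (env_start in [0, env_end) with
-- env_end > len(lines)), where A's indexing usually raises IndexError and, on the inputs where
-- A happens to break early and still return, B's precomputed full-range pass raises instead.
def Pre_find_build_flags_block (lines : List String) (env_start : Int) (env_end : Int) : Prop :=
  env_start < 0 ∨ env_end ≤ (lines.length : Int) ∨ env_end ≤ env_start
instance (lines : List String) (env_start : Int) (env_end : Int) : Decidable (Pre_find_build_flags_block lines env_start env_end) := by unfold Pre_find_build_flags_block; infer_instance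

def pvWitness_find_build_flags_block : List String × Int × Int :=
  (["[env:esp32]", "build_flags = -DX", "  -DY", "monitor_speed = 115200"], 1, 4)

def Spec_find_build_flags_block (lines : List String) (env_start : Int) (env_end : Int) (out : Int × Int) : Prop := out = find_build_flags_block_alt lines env_start env_end
instance (lines : List String) (env_start : Int) (env_end : Int) (out : Int × Int) : Decidable (Spec_find_build_flags_block lines env_start env_end out) := by unfold Spec_find_build_flags_block; infer_instance

-- ===== CLAIM (what is proved, stated in full; the proofs are below) =====
def Claim_equal_find_build_flags_block : Prop := ∀ (lines : List String) (env_start : Int) (env_end : Int), Dom_find_build_flags_block lines env_start env_end → Pre_find_build_flags_block lines env_start env_end → Spec_find_build_flags_block lines env_start env_end (find_build_flags_block lines env_start env_end)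

-- ===== LEMMAS AND PROOFS =====

-- A's inner-loop stop test equals B's key predicate (conjunct order aside)
lemma pvA_key_iff (lines : List String) (i : Int) (raw : String)
    (hget : PySem.List.pyGet? lines i = some raw) :
    pvB_keyAt lines i = true ↔
      (PySem.Str.strip raw ≠ "" ∧
       (!(PySem.Str.startswith raw " " || PySem.Str.startswith raw "\t" ||
          PySem.Str.startswith raw ";" || PySem.Str.startswith raw "#") &&
        PySem.Str.isIn "=" raw) = true) := by
  simp only [pvB_keyAt, hget, Option.getD_some, Bool.and_eq_true, decide_eq_true_eq,
    Bool.not_eq_true', Bool.or_eq_false_iff]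
  tauto

lemma pvB_get (lines : List String) (env_end i : Int) (h0 : 0 ≤ i) (h1 : i < env_end)
    (hend : env_end ≤ (lines.length : Int)) :
    ∃ raw, PySem.List.pyGet? lines i = some raw := by
  exact ⟨_, PySem.List.pyGet?_eq_some_getElem (xs := lines) h0 (by omega)⟩

lemma pvA_inner_eq (lines : List String) (env_end j : Int)
    (hj : 0 ≤ j) (hj2 : j ≤ env_end) (hend : env_end ≤ (lines.length : Int)) :
    pvA_inner lines env_end j =
      (((PySem.List.pyRange j env_end 1).filter (fun i => pvB_keyAt lines i)).head?).getD env_end := by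
  by_cases h : j < env_end
  · obtain ⟨raw, hraw⟩ := pvB_get lines env_end j hj h hend
    rw [PySem.List.pyRange_one_cons h]
    rw [pvA_inner]
    simp only [h, dif_pos, hraw, List.filter_cons]
    by_cases hk : pvB_keyAt lines j = true
    · rw [if_pos ((pvA_key_iff lines j raw hraw).mp hk), hk]
      simp
    · rw [if_neg (fun hc => hk ((pvA_key_iff lines j raw hraw).mpr hc))]
      simp only [Bool.not_eq_true] at hk
      rw [hk]
      simp only [Bool.false_eq_true, if_false]
      exact pvA_inner_eq lines env_end (j + 1) (by omega) (by omega) hend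
  · rw [pvA_inner, dif_neg h, PySem.List.pyRange_one_eq_nil (by omega)]
    simp
    omega
termination_by (env_end - j).toNat
decreasing_by omega

lemma pvA_outer_eq (lines : List String) (env_end i : Int)
    (hi : 0 ≤ i) (hend : env_end ≤ (lines.length : Int)) :
    pvA_outer lines env_end i =
      match ((PySem.List.pyRange i env_end 1).filter (fun k => pvB_bfAt lines k)).head? with
      | none => (-1, -1)
      | some s => (s, ((((PySem.List.pyRange i env_end 1).filter (fun k => pvB_keyAt lines k)).filter
                        (fun k => decide (s < k))).head?).getD env_end) := by
  by_cases h : i < env_end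
  · obtain ⟨ln, hln⟩ := pvB_get lines env_end i hi h hend
    have hbf : pvB_bfAt lines i = pvA_isBF ln := by simp [pvB_bfAt, pvA_isBF, hln]
    rw [PySem.List.pyRange_one_cons h]
    rw [pvA_outer]
    simp only [h, dif_pos, hln, List.filter_cons, hbf]
    by_cases hb : pvA_isBF ln = true
    · simp only [hb, if_pos, List.head?_cons]
      refine congrArg (Prod.mk i) ?_
      rw [pvA_inner_eq lines env_end (i + 1) (by omega) (by omega) hend]
      have hmem : ∀ k ∈ (PySem.List.pyRange (i+1) env_end 1).filter (fun k => pvB_keyAt lines k),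
          decide (i < k) = true := by
        intro k hk
        have := (PySem.List.mem_pyRange_one).mp (List.mem_of_mem_filter hk)
        simp; omega
      by_cases hki : pvB_keyAt lines i = true
      · simp only [hki, if_pos, List.filter_cons]
        simp only [lt_irrefl, decide_false, Bool.false_eq_true, if_false]
        rw [List.filter_eq_self.mpr hmem]
      · simp only [hki, Bool.false_eq_true, if_false]
        rw [List.filter_eq_self.mpr hmem]
    · simp only [hb, Bool.false_eq_true, if_false]
      rw [pvA_outer_eq lines env_end (i + 1) (by omega) hend]
      match hh : ((PySem.List.pyRange (i+1) env_end 1).filter (fun k => pvB_bfAt lines k)).head? with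
      | none => simp
      | some s =>
        have hs : i < s := by
          have hsm : s ∈ (PySem.List.pyRange (i+1) env_end 1).filter (fun k => pvB_bfAt lines k) :=
            List.mem_of_mem_head? (by rw [hh]; rfl)
          have := (PySem.List.mem_pyRange_one).mp (List.mem_of_mem_filter hsm)
          omega
        simp only
        by_cases hki : pvB_keyAt lines i = true
        · simp only [hki, if_pos, List.filter_cons]
          have hsi : decide (s < i) = false := by simp; omega
          simp [hsi]
        · simp [hki]
  · rw [pvA_outer, dif_neg h, PySem.List.pyRange_one_eq_nil (by omega)]
    simp
termination_by (env_end - i).toNat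
decreasing_by omega

-- ===== VERDICT (by name: the statement is the Claim_ definition above) =====
theorem find_build_flags_block_spec : Claim_equal_find_build_flags_block := by
  intro lines env_start env_end _hdom hpre
  unfold Spec_find_build_flags_block find_build_flags_block find_build_flags_block_alt
  by_cases hneg : env_start < 0
  · simp [hneg]
  · simp only [hneg, if_false]
    rcases hpre with h | hlen | hse
    · omega
    · rw [pvA_outer_eq lines env_end env_start (by omega) hlen]
      match hh : ((PySem.List.pyRange env_start env_end 1).filter (fun k => pvB_bfAt lines k)).head? with
      | none => simp [hh]
      | some s =>
        have hs : 0 ≤ s := by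
          have hsm : s ∈ (PySem.List.pyRange env_start env_end 1).filter (fun k => pvB_bfAt lines k) :=
            List.mem_of_mem_head? (by rw [hh]; rfl)
          have := (PySem.List.mem_pyRange_one).mp (List.mem_of_mem_filter hsm)
          omega
        have : ¬ s < 0 := by omega
        simp only [hh, Option.getD_some, if_neg this]
        rfl
    · -- empty range: both sides return (-1, -1)
      rw [pvA_outer, dif_neg (by omega), PySem.List.pyRange_one_eq_nil (by omega)]
      simp
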